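-- pv_equiv track=rewrite | github.com/Ruturajnawale10/Image-compression | find_overlap.py | find_overlap_naive_approach
-- ===== SOURCE A (Python) =====
-- def find_overlap_naive_approach(microscope_image, dye_image):
--     # Get total black pixels and overlapped black pixels in microscope image
--     microscope_black_pixels = 0
--     overlaped_black_pixels = 0
--
--     for i in range(len(microscope_image)):
--         for j in range(len(microscope_image[0])):
--             if microscope_image[i][j] == 0:
--                 microscope_black_pixels += 1
--                 if dye_image[i][j] == 0:
--                     overlaped_black_pixels += 1
--
--     return microscope_black_pixels, overlaped_black_pixels
-- ===== SOURCE B (Python) =====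
-- def find_overlap_naive_approach(microscope_image, dye_image):
--     # Two separate passes over the same grid: count black pixels, then overlaps.
--     n = len(microscope_image)
--     if n == 0:
--         return 0, 0
--     w = len(microscope_image[0])
--     black = sum(1 for i in range(n) for j in range(w)
--                 if microscope_image[i][j] == 0)
--     overlap = sum(1 for i in range(n) for j in range(w)
--                   if microscope_image[i][j] == 0 and dye_image[i][j] == 0)
--     return black, overlap
-- ===== Notes on version B (the rewrite author's own statement) =====
-- stated objective: simpler
-- what changed: Replaces A's single combined nested loop carrying two counters with an empty guard and two independent comprehension passes (one per count) over the same grid.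
import Mathlib
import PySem

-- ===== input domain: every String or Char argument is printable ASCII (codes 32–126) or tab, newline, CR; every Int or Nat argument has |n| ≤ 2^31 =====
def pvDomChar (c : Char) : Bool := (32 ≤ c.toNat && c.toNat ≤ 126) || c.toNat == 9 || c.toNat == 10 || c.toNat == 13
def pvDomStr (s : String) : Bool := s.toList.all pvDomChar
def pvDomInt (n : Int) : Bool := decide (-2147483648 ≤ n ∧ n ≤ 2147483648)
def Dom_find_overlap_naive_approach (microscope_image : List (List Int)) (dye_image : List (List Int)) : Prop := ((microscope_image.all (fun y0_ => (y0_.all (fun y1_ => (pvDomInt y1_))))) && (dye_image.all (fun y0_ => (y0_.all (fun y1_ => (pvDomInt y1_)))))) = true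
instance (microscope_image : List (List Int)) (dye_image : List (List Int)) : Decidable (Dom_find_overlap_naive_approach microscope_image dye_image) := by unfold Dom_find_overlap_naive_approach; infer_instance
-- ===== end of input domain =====

-- B replaces A's single combined nested loop (two counters in one scan) with an
-- empty guard and two independent passes, one per count (objective: simpler).

-- ===== PORT A =====
-- One combined scan: state (black, overlap), indices via pyRange, lookups via
-- pyGetD (Pre_ guarantees every lookup A performs is in range, so the defaults
-- are never the value used on admitted inputs).
def find_overlap_naive_approach (microscope_image : List (List Int)) (dye_image : List (List Int)) : Int × Int :=
  (PySem.List.pyRange 0 (microscope_image.length : Int) 1).foldl (fun st i =>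
    (PySem.List.pyRange 0 ((PySem.List.pyGetD microscope_image 0 []).length : Int) 1).foldl (fun st j =>
      if PySem.List.pyGetD (PySem.List.pyGetD microscope_image i []) j 1 == 0 then
        (st.1 + 1,
         if PySem.List.pyGetD (PySem.List.pyGetD dye_image i []) j 1 == 0 then st.2 + 1 else st.2)
      else st) st) (0, 0)

-- ===== PORT B =====
-- Empty guard, then two separate nested sums over the same grid.
def find_overlap_naive_approach_alt (microscope_image : List (List Int)) (dye_image : List (List Int)) : Int × Int :=
  if (microscope_image.length : Int) == 0 then (0, 0) else
  let w : Int := ((PySem.List.pyGetD microscope_image 0 []).length : Int)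
  let black : Int :=
    (PySem.List.pyRange 0 (microscope_image.length : Int) 1).foldl (fun acc i =>
      (PySem.List.pyRange 0 w 1).foldl (fun acc j =>
        acc + (if PySem.List.pyGetD (PySem.List.pyGetD microscope_image i []) j 1 == 0 then 1 else 0)) acc) 0
  let overlap : Int :=
    (PySem.List.pyRange 0 (microscope_image.length : Int) 1).foldl (fun acc i =>
      (PySem.List.pyRange 0 w 1).foldl (fun acc j =>
        acc + (if PySem.List.pyGetD (PySem.List.pyGetD microscope_image i []) j 1 == 0
                  && PySem.List.pyGetD (PySem.List.pyGetD dye_image i []) j 1 == 0 then 1 else 0)) acc) 0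
  (black, overlap)

-- ===== PRECONDITION & SPEC =====
-- Pre_ excludes exactly the inputs where Python A raises IndexError: some row
-- of microscope_image is shorter than row 0, or a black microscope pixel has no
-- corresponding dye_image entry.
def Pre_find_overlap_naive_approach (microscope_image : List (List Int)) (dye_image : List (List Int)) : Prop :=
  ∀ i ∈ List.range microscope_image.length,
    ∀ j ∈ List.range (microscope_image.headD []).length,
      j < (microscope_image.getD i []).length ∧
      ((microscope_image.getD i []).getD j 1 = 0 →
        i < dye_image.length ∧ j < (dye_image.getD i []).length)
instance (microscope_image : List (List Int)) (dye_image : List (List Int)) : Decidable (Pre_find_overlap_naive_approach microscope_image dye_image) := by unfold Pre_find_overlap_naive_approach; infer_instance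

def pvWitness_find_overlap_naive_approach : List (List Int) × List (List Int) :=
  ([[0, 1], [1, 0]], [[0, 0], [1, 1]])

def Spec_find_overlap_naive_approach (microscope_image : List (List Int)) (dye_image : List (List Int)) (out : Int × Int) : Prop := out = find_overlap_naive_approach_alt microscope_image dye_image
instance (microscope_image : List (List Int)) (dye_image : List (List Int)) (out : Int × Int) : Decidable (Spec_find_overlap_naive_approach microscope_image dye_image out) := by unfold Spec_find_overlap_naive_approach; infer_instance

-- ===== CLAIM (what is proved, stated in full; the proofs are below) =====
def Claim_equal_find_overlap_naive_approach : Prop := ∀ (microscope_image : List (List Int)) (dye_image : List (List Int)), Dom_find_overlap_naive_approach microscope_image dye_image → Pre_find_overlap_naive_approach microscope_image dye_image → Spec_find_overlap_naive_approach microscope_image dye_image (find_overlap_naive_approach microscope_image dye_image)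

-- ===== LEMMAS AND PROOFS =====

-- A fold whose step updates the two components independently splits into two folds.
theorem pv_foldl_pair {α : Type} (l : List α) (h : Int × Int → α → Int × Int)
    (f g : Int → α → Int) (hfg : ∀ p x, h p x = (f p.1 x, g p.2 x)) (a b : Int) :
    l.foldl h (a, b) = (l.foldl f a, l.foldl g b) := by
  induction l generalizing a b with
  | nil => rfl
  | cons x xs ih => rw [List.foldl_cons, hfg]; exact ih (f a x) (g b x)

-- A's combined inner/outer loop equals the pair of B's two loops, unconditionally.
theorem pv_split (microscope_image dye_image : List (List Int)) :
    find_overlap_naive_approach microscope_image dye_image =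
      ((PySem.List.pyRange 0 (microscope_image.length : Int) 1).foldl (fun acc i =>
        (PySem.List.pyRange 0 ((PySem.List.pyGetD microscope_image 0 []).length : Int) 1).foldl (fun acc j =>
          acc + (if PySem.List.pyGetD (PySem.List.pyGetD microscope_image i []) j 1 == 0 then 1 else 0)) acc) 0,
       (PySem.List.pyRange 0 (microscope_image.length : Int) 1).foldl (fun acc i =>
        (PySem.List.pyRange 0 ((PySem.List.pyGetD microscope_image 0 []).length : Int) 1).foldl (fun acc j =>
          acc + (if PySem.List.pyGetD (PySem.List.pyGetD microscope_image i []) j 1 == 0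
                    && PySem.List.pyGetD (PySem.List.pyGetD dye_image i []) j 1 == 0 then 1 else 0)) acc) 0) := by
  unfold find_overlap_naive_approach
  apply pv_foldl_pair
  intro p i
  obtain ⟨a, b⟩ := p
  apply pv_foldl_pair
  intro q j
  obtain ⟨x, y⟩ := q
  by_cases h1 : PySem.List.pyGetD (PySem.List.pyGetD microscope_image i []) j 1 == 0 <;>
    by_cases h2 : PySem.List.pyGetD (PySem.List.pyGetD dye_image i []) j 1 == 0 <;>
    simp [h1, h2]

-- ===== VERDICT (by name: the statement is the Claim_ definition above) =====
theorem find_overlap_naive_approach_spec : Claim_equal_find_overlap_naive_approach := by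
  intro mi dye _ _
  unfold Spec_find_overlap_naive_approach find_overlap_naive_approach_alt
  rw [pv_split]
  by_cases h : (mi.length : Int) == 0
  · have h0 : mi.length = 0 := by simpa using h
    simp [h0, PySem.List.pyRange_one_eq_nil]
  · simp [h]
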